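-- pv_equiv track=rewrite | github.com/Mohamed-Elwaei/Leetcode-Solutions | 3111. Minimum Rectangles to Cover Points.py | minRectanglesToCoverPoints
-- ===== SOURCE A (Python) =====
-- from typing import List
--
-- def minRectanglesToCoverPoints(points: List[List[int]], w: int) -> int:
--
--     points = [x for x,y in points]
--     points.sort()
--
--
--     end = -1
--
--     count = 0
--     for p in points:
--         if p > end:
--             end = p + w
--             count += 1
--
--     return count
-- ===== SOURCE B (Python) =====
-- def minRectanglesToCoverPoints(points, w):
--     xs = sorted(x for x, y in points)
--     n = len(xs)
--     count = 0
--     i = 0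
--     while i < n:
--         count += 1
--         # jump to the first index after i whose x exceeds xs[i] + w (binary search)
--         limit = xs[i] + w
--         lo, hi = i + 1, n
--         while lo < hi:
--             mid = (lo + hi) // 2
--             if xs[mid] <= limit:
--                 lo = mid + 1
--             else:
--                 hi = mid
--         i = lo
--     return count
-- ===== Notes on version B (the rewrite author's own statement) =====
-- stated objective: alternative
-- what changed: Replaces the per-element linear scan with a running `end` by an index pointer that binary-search-jumps from each rectangle's start directly to the first point past its right edge, so covered points are skipped in O(log n) instead of being compared one by one.
-- outside the precondition, e.g. on minRectanglesToCoverPoints([[-2, 0], [3, 0]], 1): A returns 1, B returns 2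
import Mathlib
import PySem

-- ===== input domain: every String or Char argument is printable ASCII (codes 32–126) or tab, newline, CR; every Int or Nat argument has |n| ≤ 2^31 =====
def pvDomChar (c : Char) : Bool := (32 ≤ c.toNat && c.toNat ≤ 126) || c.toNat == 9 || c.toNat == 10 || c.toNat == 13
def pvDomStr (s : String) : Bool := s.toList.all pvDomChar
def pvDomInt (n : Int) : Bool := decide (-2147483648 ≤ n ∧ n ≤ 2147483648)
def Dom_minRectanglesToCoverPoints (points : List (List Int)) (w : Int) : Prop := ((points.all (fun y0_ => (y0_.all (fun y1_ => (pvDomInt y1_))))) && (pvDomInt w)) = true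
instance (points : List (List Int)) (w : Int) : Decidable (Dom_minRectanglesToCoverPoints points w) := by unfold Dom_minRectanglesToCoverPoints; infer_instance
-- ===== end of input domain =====

-- B replaces A's linear scan over the sorted x's by binary-search jumps to the next uncovered
-- point (alternative decomposition, same asymptotic cost; equivalence proved on the problem's
-- natural domain of nonnegative x-coordinates and length-2 rows).


-- ===== PORT A =====
-- 'points = [x for x,y in points]': under Pre_ every row is [x, y]; headD 0 reads x (exact there).
def minRectanglesToCoverPoints (points : List (List Int)) (w : Int) : Int :=
  let xs := PySem.List.sorted (points.map (fun r => r.headD 0)) (fun x => x) false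
  (xs.foldl (fun (s : Int × Int) p => if s.1 < p then (p + w, s.2 + 1) else s) (-1, 0)).2

-- ===== PORT B =====
-- the hand-written inner binary search of Source B: while lo < hi: mid=(lo+hi)//2; …
-- (Source B's `mid` is inlined as (lo + hi) / 2; the fuel argument only makes the while-loop
-- structurally total — hi - lo shrinks at every iteration, so fuel = hi - lo always suffices)
def pvBisectGo (xs : List Int) (limit : Int) : Nat → Nat → Nat → Nat
  | 0, lo, _ => lo
  | fuel + 1, lo, hi =>
    if lo < hi then
      if xs.getD ((lo + hi) / 2) 0 ≤ limit then pvBisectGo xs limit fuel ((lo + hi) / 2 + 1) hi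
      else pvBisectGo xs limit fuel lo ((lo + hi) / 2)
    else lo

def pvBisect (xs : List Int) (limit : Int) (lo hi : Nat) : Nat :=
  pvBisectGo xs limit (hi - lo) lo hi

-- the outer while-loop of Source B: index pointer i jumping to the first point past xs[i] + w
-- (i strictly increases each iteration, so fuel = xs.length - i iterations always suffice)
def pvJumpGo (xs : List Int) (w : Int) : Nat → Nat → Int → Int
  | 0, _, count => count
  | fuel + 1, i, count =>
    if i < xs.length then
      pvJumpGo xs w fuel (pvBisect xs (xs.getD i 0 + w) (i + 1) xs.length) (count + 1)
    else count

-- Source B's 'sorted(x for x, y in points)': under Pre_ every row is [x, y]; headD 0 reads x (exact there).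
def minRectanglesToCoverPoints_alt (points : List (List Int)) (w : Int) : Int :=
  let xs := PySem.List.sorted (points.map (fun r => r.headD 0)) (fun x => x) false
  pvJumpGo xs w xs.length 0 0

-- ===== PRECONDITION & SPEC =====
-- Pre_ restricts to the problem's natural domain (LeetCode 3111 guarantees rows [x, y] with
-- 1 ≤ x): a row whose length is not 2 makes A's unpacking raise ValueError, and a negative
-- x-coordinate is outside the problem's constraints (A's `end = -1` sentinel then silently
-- skips leading points; excluded examples are cited in the claim).
def Pre_minRectanglesToCoverPoints (points : List (List Int)) (w : Int) : Prop :=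
  (∀ r ∈ points, r.length = 2) ∧ (∀ r ∈ points, 0 ≤ r.headD 0)
instance (points : List (List Int)) (w : Int) : Decidable (Pre_minRectanglesToCoverPoints points w) := by
  unfold Pre_minRectanglesToCoverPoints; infer_instance

def pvWitness_minRectanglesToCoverPoints : List (List Int) × Int := ([[1, 2], [4, 5], [0, 3]], 2)

def Spec_minRectanglesToCoverPoints (points : List (List Int)) (w : Int) (out : Int) : Prop := out = minRectanglesToCoverPoints_alt points w
instance (points : List (List Int)) (w : Int) (out : Int) : Decidable (Spec_minRectanglesToCoverPoints points w out) := by unfold Spec_minRectanglesToCoverPoints; infer_instance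

-- ===== CLAIM (what is proved, stated in full; the proofs are below) =====
def Claim_equal_minRectanglesToCoverPoints : Prop := ∀ (points : List (List Int)) (w : Int), Dom_minRectanglesToCoverPoints points w → Pre_minRectanglesToCoverPoints points w → Spec_minRectanglesToCoverPoints points w (minRectanglesToCoverPoints points w)

-- ===== LEMMAS AND PROOFS =====

-- A's loop body as a named step function (for readability of the lemmas)
def pvStep (w : Int) (s : Int × Int) (p : Int) : Int × Int :=
  if s.1 < p then (p + w, s.2 + 1) else s

theorem foldl_skip (w : Int) (l1 l2 : List Int) (e : Int) (c : Int)
    (h : ∀ p ∈ l1, ¬ e < p) :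
    (l1 ++ l2).foldl (pvStep w) (e, c) = l2.foldl (pvStep w) (e, c) := by
  induction l1 with
  | nil => simp
  | cons p t ih =>
      have hp : ¬ e < p := h p (by simp)
      simp only [List.cons_append, List.foldl_cons, pvStep, hp]
      exact ih (fun q hq => h q (by simp [hq]))

theorem pvBisectGo_ge (xs : List Int) (limit : Int) :
    ∀ fuel lo hi, lo ≤ pvBisectGo xs limit fuel lo hi := by
  intro fuel
  induction fuel with
  | zero => intro lo hi; simp [pvBisectGo]
  | succ f ih =>
      intro lo hi
      simp only [pvBisectGo]
      split_ifs with h1 h2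
      · exact le_trans (by omega) (ih ((lo + hi) / 2 + 1) hi)
      · exact ih lo ((lo + hi) / 2)
      · exact le_refl lo

theorem pvBisectGo_spec (xs : List Int) (limit : Int) (hs : xs.Pairwise (· ≤ ·)) :
    ∀ fuel lo hi, hi - lo ≤ fuel → hi ≤ xs.length →
      (lo ≤ hi → pvBisectGo xs limit fuel lo hi ≤ hi) ∧
      (∀ k, lo ≤ k → k < pvBisectGo xs limit fuel lo hi → k < hi → xs.getD k 0 ≤ limit) ∧
      (pvBisectGo xs limit fuel lo hi < hi → limit < xs.getD (pvBisectGo xs limit fuel lo hi) 0) := by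
  intro fuel
  induction fuel with
  | zero =>
      intro lo hi hf hhi
      simp only [pvBisectGo]
      exact ⟨fun h => h, fun k hk1 hk2 _ => absurd hk2 (by omega), fun h => absurd h (by omega)⟩
  | succ f ih =>
      intro lo hi hf hhi
      simp only [pvBisectGo]
      split_ifs with h1 hle
      · -- xs[mid] ≤ limit: recurse on (mid+1, hi)
        obtain ⟨ih1, ih2, ih3⟩ := ih ((lo + hi) / 2 + 1) hi (by omega) hhi
        have hub := ih1 (by omega)
        refine ⟨fun _ => hub, ?_, ih3⟩
        intro k hk1 hk2 hk3
        by_cases hkm : (lo + hi) / 2 + 1 ≤ k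
        · exact ih2 k hkm hk2 hk3
        · -- k ≤ mid: by sortedness xs[k] ≤ xs[mid] ≤ limit
          have hmidlt : (lo + hi) / 2 < xs.length := by omega
          have hklt : k < xs.length := by omega
          have hle2 : xs.getD k 0 ≤ xs.getD ((lo + hi) / 2) 0 := by
            rw [List.getD_eq_getElem xs 0 hklt, List.getD_eq_getElem xs 0 hmidlt]
            rcases Nat.lt_or_ge k ((lo + hi) / 2) with hlt | hge
            · exact List.pairwise_iff_getElem.mp hs k ((lo + hi) / 2) hklt hmidlt hlt
            · have : k = (lo + hi) / 2 := by omega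
              subst this; exact le_refl _
          exact le_trans hle2 hle
      · -- limit < xs[mid]: recurse on (lo, mid)
        obtain ⟨ih1, ih2, ih3⟩ := ih lo ((lo + hi) / 2) (by omega) (by omega)
        have hub := ih1 (by omega)
        have hres := pvBisectGo_ge xs limit f lo ((lo + hi) / 2)
        refine ⟨fun _ => by omega, ?_, ?_⟩
        · intro k hk1 hk2 _
          exact ih2 k hk1 hk2 (by omega)
        · intro _
          rcases Nat.lt_or_ge (pvBisectGo xs limit f lo ((lo + hi) / 2)) ((lo + hi) / 2) with h2 | h2
          · exact ih3 h2
          · have : pvBisectGo xs limit f lo ((lo + hi) / 2) = (lo + hi) / 2 := by omega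
            rw [this]; omega
      · exact ⟨fun h => h, fun k hk1 hk2 _ => absurd hk2 (by omega), fun h => absurd h h1⟩

-- the core correspondence: A's scan over the sorted tail equals B's jump loop,
-- provided the state `e` is below the next point (so it opens a rectangle there)
theorem scan_eq_jump (xs : List Int) (w : Int) (hs : xs.Pairwise (· ≤ ·)) :
    ∀ fuel i c (e : Int), xs.length - i ≤ fuel → (i < xs.length → e < xs.getD i 0) →
      ((xs.drop i).foldl (pvStep w) (e, c)).2 = pvJumpGo xs w fuel i c := by
  intro fuel
  induction fuel with
  | zero =>
      intro i c e hf _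
      have : xs.drop i = [] := List.drop_of_length_le (by omega)
      rw [this]; rfl
  | succ f ih =>
      intro i c e hf he
      simp only [pvJumpGo]
      split_ifs with h
      · have hei := he h
        set limit := xs.getD i 0 + w with hlimit
        obtain ⟨hjle0, hsk, hnext⟩ :=
          pvBisectGo_spec xs limit hs (xs.length - (i + 1)) (i + 1) xs.length (le_refl _) (le_refl _)
        have hjge0 : i + 1 ≤ pvBisectGo xs limit (xs.length - (i + 1)) (i + 1) xs.length :=
          pvBisectGo_ge xs limit (xs.length - (i + 1)) (i + 1) xs.length
        have hbis : pvBisect xs limit (i + 1) xs.length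
            = pvBisectGo xs limit (xs.length - (i + 1)) (i + 1) xs.length := rfl
        rw [hbis]
        set j := pvBisectGo xs limit (xs.length - (i + 1)) (i + 1) xs.length with hj
        clear_value j
        have hjge : i + 1 ≤ j := hjge0
        have hjn : j ≤ xs.length := hjle0 (by omega)
        -- unfold one scan step
        have hdrop : xs.drop i = xs[i] :: xs.drop (i + 1) := List.drop_eq_getElem_cons h
        rw [hdrop, List.foldl_cons]
        have hgd : xs.getD i 0 = xs[i] := List.getD_eq_getElem xs 0 h
        have hei' : e < xs[i] := hgd ▸ hei
        have hstep : pvStep w (e, c) xs[i] = (limit, c + 1) := by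
          simp only [pvStep]
          rw [hlimit, hgd]
          exact if_pos hei'
        rw [hstep]
        -- split the tail at j and skip the covered segment
        have hsplit : xs.drop (i + 1)
            = (xs.drop (i + 1)).take (j - (i + 1)) ++ xs.drop j := by
          conv_lhs => rw [← List.take_append_drop (j - (i + 1)) (xs.drop (i + 1))]
          rw [List.drop_drop]
          have harith : i + 1 + (j - (i + 1)) = j := by omega
          rw [harith]
        rw [hsplit, foldl_skip]
        · exact ih j (c + 1) limit (by omega) (fun hjlt => hnext hjlt)
        · intro p hp
          rw [List.mem_take_iff_getElem] at hp
          obtain ⟨k, hk, hkp⟩ := hp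
          have hdl : (xs.drop (i + 1)).length = xs.length - (i + 1) := List.length_drop ..
          have hklen : i + 1 + k < xs.length := by omega
          have hpk : p = xs[i + 1 + k] := by
            rw [← hkp, List.getElem_drop]
          have hple : xs.getD (i + 1 + k) 0 ≤ limit :=
            hsk (i + 1 + k) (by omega) (by omega) (by omega)
          rw [List.getD_eq_getElem xs 0 hklen] at hple
          omega
      · have : xs.drop i = [] := List.drop_of_length_le (by omega)
        rw [this]; rfl

theorem pre_head_nonneg (points : List (List Int))
    (hpre : ∀ r ∈ points, 0 ≤ r.headD 0) :
    ∀ x ∈ PySem.List.sorted (points.map (fun r => r.headD 0)) (fun x => x) false, 0 ≤ x := by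
  intro x hx
  rw [PySem.List.mem_sorted] at hx
  obtain ⟨r, hr, hrx⟩ := List.mem_map.mp hx
  exact hrx ▸ hpre r hr

-- ===== VERDICT (by name: the statement is the Claim_ definition above) =====
theorem minRectanglesToCoverPoints_spec : Claim_equal_minRectanglesToCoverPoints := by
  intro points w _hdom hpre
  unfold Spec_minRectanglesToCoverPoints minRectanglesToCoverPoints minRectanglesToCoverPoints_alt
  set xs := PySem.List.sorted (points.map (fun r => r.headD 0)) (fun x => x) false with hxs
  have hs : xs.Pairwise (· ≤ ·) := PySem.List.sorted_pairwise ..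
  have h0 : (0 : Nat) < xs.length → (-1 : Int) < xs.getD 0 0 := by
    intro hlen
    have hmem : xs.getD 0 0 ∈ xs := by
      rw [List.getD_eq_getElem xs 0 hlen]; exact List.getElem_mem hlen
    have := pre_head_nonneg points hpre.2 _ (hxs ▸ hmem)
    rw [← hxs] at this
    omega
  have := scan_eq_jump xs w hs xs.length 0 0 (-1) (by omega) h0
  simpa using this
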